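-- pv_equiv track=rewrite | github.com/SerendipitysX/ChartSpark | evaluation/CON_F_eva.py | find_distance
-- ===== SOURCE A (Python) =====
-- def find_distance(matrix):
--     num_rows = len(matrix)
--     num_cols = len(matrix[0])
--     distances = []
--
--     for col in range(num_cols):
--         first_non_zero = None
--         last_non_zero = None
--
--         for row in range(num_rows):
--             if matrix[row][col] != 0 and first_non_zero is None:
--                 first_non_zero = row
--             if matrix[row][col] != 0:
--                 last_non_zero = row
--
--         if first_non_zero is None or last_non_zero is None:
--             distances.append(0)
--         else:
--             distance = last_non_zero - first_non_zero
--             distances.append(distance)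
--
--     return distances
-- ===== SOURCE B (Python) =====
-- def find_distance(matrix):
--     n = len(matrix[0])
--     state = [(None, None)] * n
--     for r, row in enumerate(matrix):
--         state = [
--             ((f if f is not None else r), r) if row[c] != 0 else (f, l)
--             for c, (f, l) in enumerate(state)
--         ]
--     return [l - f if f is not None else 0 for (f, l) in state]
-- ===== Notes on version B (the rewrite author's own statement) =====
-- stated objective: alternative
-- what changed: Flips the loop nesting from column-major stateful scanning to a single row-major pass that maintains whole per-column (first,last) arrays, rebuilt functionally per row; the per-column first-seen branch collapses into one conditional pair update.
import Mathlib
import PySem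

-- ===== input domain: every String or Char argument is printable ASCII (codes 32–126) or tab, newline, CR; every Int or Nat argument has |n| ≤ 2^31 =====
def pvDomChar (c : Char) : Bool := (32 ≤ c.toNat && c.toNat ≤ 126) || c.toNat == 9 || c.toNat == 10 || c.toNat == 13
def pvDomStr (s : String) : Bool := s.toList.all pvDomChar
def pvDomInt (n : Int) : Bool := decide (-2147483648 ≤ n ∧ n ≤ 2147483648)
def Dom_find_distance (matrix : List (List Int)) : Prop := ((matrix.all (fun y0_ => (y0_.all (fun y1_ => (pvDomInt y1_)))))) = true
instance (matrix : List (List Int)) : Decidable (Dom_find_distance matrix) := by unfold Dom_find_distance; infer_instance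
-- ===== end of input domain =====

-- B replaces A's column-major stateful scan by one row-major pass maintaining per-column (first,last) arrays (alternative decomposition, same cost).

-- ===== PORT A =====
def find_distance (matrix : List (List Int)) : List Int :=
  let num_rows : Int := matrix.length
  let num_cols : Int := ((PySem.List.pyGet? matrix 0).getD []).length
  (PySem.List.pyRange 0 num_cols 1).foldl (fun distances col =>
    let fl := (PySem.List.pyRange 0 num_rows 1).foldl
      (fun (st : Option Int × Option Int) row =>
        let cell := PySem.List.pyGetD (PySem.List.pyGetD matrix row []) col 0
        let first := if cell ≠ 0 ∧ st.1 = none then some row else st.1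
        let last := if cell ≠ 0 then some row else st.2
        (first, last))
      (none, none)
    if fl.1 = none ∨ fl.2 = none then distances ++ [(0 : Int)]
    else distances ++ [fl.2.getD 0 - fl.1.getD 0]) []

-- ===== PORT B =====
def find_distance_alt (matrix : List (List Int)) : List Int :=
  let n : Int := ((PySem.List.pyGet? matrix 0).getD []).length
  let state0 : List (Option Int × Option Int) := List.replicate n.toNat (none, none)
  let state := (PySem.List.enumerate matrix).foldl
    (fun st (p : Int × List Int) =>
      (PySem.List.enumerate st).map (fun cp =>
        if PySem.List.pyGetD p.2 cp.1 0 ≠ 0 then (some (cp.2.1.getD p.1), some p.1)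
        else cp.2))
    state0
  state.map (fun fl => if fl.1 = none then (0 : Int) else fl.2.getD 0 - fl.1.getD 0)

-- ===== PRECONDITION & SPEC =====
-- Pre_ excludes exactly the inputs on which Python A raises IndexError: the empty
-- matrix (matrix[0]) and ragged matrices with a row shorter than the first row
-- (matrix[row][col]); Python B raises on the same inputs.
def Pre_find_distance (matrix : List (List Int)) : Prop :=
  matrix ≠ [] ∧ ∀ row ∈ matrix, matrix.headI.length ≤ row.length
instance (matrix : List (List Int)) : Decidable (Pre_find_distance matrix) := by
  unfold Pre_find_distance; infer_instance
def pvWitness_find_distance : List (List Int) := [[0, 3], [1, 0], [0, 2]]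
def Spec_find_distance (matrix : List (List Int)) (out : List Int) : Prop := out = find_distance_alt matrix
instance (matrix : List (List Int)) (out : List Int) : Decidable (Spec_find_distance matrix out) := by unfold Spec_find_distance; infer_instance

-- ===== CLAIM (what is proved, stated in full; the proofs are below) =====
def Claim_equal_find_distance : Prop := ∀ (matrix : List (List Int)), Dom_find_distance matrix → Pre_find_distance matrix → Spec_find_distance matrix (find_distance matrix)

-- ===== LEMMAS AND PROOFS =====

-- the shared per-column cell update, and the column fold both programs compute
def pvStep (c : Int) (st : Option Int × Option Int) (p : Int × List Int) :
    Option Int × Option Int :=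
  if PySem.List.pyGetD p.2 c 0 ≠ 0 then (some (st.1.getD p.1), some p.1) else st

def pvCol (matrix : List (List Int)) (c : Int) : Option Int × Option Int :=
  (PySem.List.enumerate matrix).foldl (pvStep c) (none, none)

theorem pvCol_fst_none_iff (matrix : List (List Int)) (c : Int) :
    ((pvCol matrix c).1 = none ↔ (pvCol matrix c).2 = none) := by
  unfold pvCol
  suffices h : ∀ (l : List (Int × List Int)) (st : Option Int × Option Int),
      (st.1 = none ↔ st.2 = none) →
      ((l.foldl (pvStep c) st).1 = none ↔ (l.foldl (pvStep c) st).2 = none) by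
    exact h _ _ (by simp)
  intro l
  induction l with
  | nil => intro st h; simpa using h
  | cons p t ih =>
    intro st h
    simp only [List.foldl_cons]
    apply ih
    by_cases hc : PySem.List.pyGetD p.2 c 0 ≠ 0 <;> simp [pvStep, hc, h]

theorem pvEnumerate_map (f : α → β) :
    ∀ (xs : List α) (s : Int),
      PySem.List.enumerate (xs.map f) s
        = (PySem.List.enumerate xs s).map (fun p => (p.1, f p.2)) := by
  intro xs
  induction xs with
  | nil => intro s; simp [PySem.List.enumerate_nil]
  | cons x t ih => intro s; simp [PySem.List.enumerate_cons, ih]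

theorem pvEnumerate_enumerate (xs : List α) :
    ∀ (s : Int),
      PySem.List.enumerate (PySem.List.enumerate xs s) s
        = (PySem.List.enumerate xs s).map (fun p => (p.1, p)) := by
  induction xs with
  | nil => intro s; simp [PySem.List.enumerate_nil]
  | cons x t ih => intro s; simp [PySem.List.enumerate_cons, ih]

-- B's row-major fold, read per column: element c of the final state is pvCol c
theorem pvStateFold (rows : List (Int × List Int)) :
    ∀ (st : List (Option Int × Option Int)),
      rows.foldl
        (fun st (p : Int × List Int) =>
          (PySem.List.enumerate st).map (fun cp =>
            if PySem.List.pyGetD p.2 cp.1 0 ≠ 0 then (some (cp.2.1.getD p.1), some p.1)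
            else cp.2))
        st
      = (PySem.List.enumerate st).map
          (fun cp => rows.foldl (pvStep cp.1) cp.2) := by
  induction rows with
  | nil =>
    intro st
    simp only [List.foldl_nil]
    exact (PySem.List.map_snd_enumerate st 0).symm
  | cons p t ih =>
    intro st
    simp only [List.foldl_cons]
    rw [ih, pvEnumerate_map, pvEnumerate_enumerate, List.map_map, List.map_map]
    apply List.map_congr_left
    intro cp _
    simp only [Function.comp]
    by_cases hc : PySem.List.pyGetD p.2 cp.1 0 ≠ 0 <;> simp [pvStep, hc]

theorem pvReplicate_pyGetD (n : Nat) (x : Option Int × Option Int) (j : Int)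
    (h0 : 0 ≤ j) (hj : j < (n : Int)) :
    PySem.List.pyGetD (List.replicate n x) j ((none : Option Int), (none : Option Int)) = x := by
  rw [PySem.List.pyGetD_eq_getElem (List.replicate n x) ((none : Option Int), (none : Option Int)) h0
    (by simpa using hj)]
  simp

-- A's inner fold over row indices is the fold over enumerate
theorem pvA_inner (matrix : List (List Int)) (c : Int) :
    (PySem.List.pyRange 0 (matrix.length : Int) 1).foldl
      (fun (st : Option Int × Option Int) row =>
        let cell := PySem.List.pyGetD (PySem.List.pyGetD matrix row []) c 0
        let first := if cell ≠ 0 ∧ st.1 = none then some row else st.1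
        let last := if cell ≠ 0 then some row else st.2
        (first, last))
      (none, none)
    = pvCol matrix c := by
  unfold pvCol
  rw [PySem.List.enumerate_eq_map_pyRange matrix [], List.foldl_map]
  congr 1
  funext st j
  by_cases hc : PySem.List.pyGetD (PySem.List.pyGetD matrix j []) c 0 = 0
  · cases st; simp [pvStep, hc]
  · cases h1 : st.1 <;> simp [pvStep, hc, h1]

-- ===== VERDICT (by name: the statement is the Claim_ definition above) =====
theorem find_distance_spec : Claim_equal_find_distance := by
  intro matrix _ _
  unfold Spec_find_distance find_distance find_distance_alt
  simp only []
  rw [pvStateFold]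
  set n : Int := (((PySem.List.pyGet? matrix 0).getD []).length : Int) with hn
  have hn0 : 0 ≤ n := by simp [hn]
  -- A side: foldl-append is map
  rw [show (fun (distances : List Int) col =>
        let fl := (PySem.List.pyRange 0 (matrix.length : Int) 1).foldl
          (fun (st : Option Int × Option Int) row =>
            let cell := PySem.List.pyGetD (PySem.List.pyGetD matrix row []) col 0
            let first := if cell ≠ 0 ∧ st.1 = none then some row else st.1
            let last := if cell ≠ 0 then some row else st.2
            (first, last))
          (none, none)
        if fl.1 = none ∨ fl.2 = none then distances ++ [(0 : Int)]
        else distances ++ [fl.2.getD 0 - fl.1.getD 0])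
      = (fun (distances : List Int) col =>
          distances ++ [if (pvCol matrix col).1 = none ∨ (pvCol matrix col).2 = none then (0 : Int)
            else (pvCol matrix col).2.getD 0 - (pvCol matrix col).1.getD 0]) from ?_]
  · rw [PySem.List.foldl_append_singleton_eq_map]
    -- B side: enumerate of replicate, then pointwise comparison
    rw [PySem.List.enumerate_eq_map_pyRange (List.replicate n.toNat ((none : Option Int), (none : Option Int)))
          ((none : Option Int), (none : Option Int)),
        List.map_map, List.map_map]
    simp only [PySem.List.len_eq, List.length_replicate, List.nil_append]
    rw [show ((n.toNat : Int)) = n from Int.toNat_of_nonneg hn0]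
    apply List.map_congr_left
    intro c hc
    have hcb := (PySem.List.mem_pyRange_one).1 hc
    simp only [Function.comp]
    rw [pvReplicate_pyGetD n.toNat _ c hcb.1 (by rw [Int.toNat_of_nonneg hn0]; exact hcb.2)]
    have hfold : List.foldl (pvStep c) ((none : Option Int), (none : Option Int))
        (PySem.List.enumerate matrix) = pvCol matrix c := rfl
    rw [hfold]
    have hiff := pvCol_fst_none_iff matrix c
    by_cases h1 : (pvCol matrix c).1 = none
    · simp [h1, hiff.1 h1]
    · have h2 : ¬ (pvCol matrix c).2 = none := fun h => h1 (hiff.2 h)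
      simp [h1, h2]
  · funext distances col
    simp only [pvA_inner]
    split_ifs <;> rfl
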